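-- pv_equiv track=rewrite | github.com/OmniNode-ai/omnibase_core | scripts/regenerate_fingerprints.py | _find_version_block_end
-- ===== SOURCE A (Python) =====
-- def _find_version_block_end(content: str, version_start: int) -> int:
--     """Find the end of a version block (dict-style or inline).
--
--     For dict-style version blocks like:
--         version:
--           major: 1
--           minor: 0
--           patch: 0
--
--     Returns the position after the last line of the block.
--
--     Args:
--         content: Full YAML content.
--         version_start: Start position of the 'version:' line.
--
--     Returns:
--         Position after the version block ends.
--     """
--     lines = content[version_start:].split("\n")
--     if not lines:
--         return version_start
--
--     # Check the first line to get version: line indent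
--     first_line = lines[0]
--     version_indent = len(first_line) - len(first_line.lstrip())
--
--     # Check if it's inline (version: "1.0.0") or dict-style (version:\n  major:)
--     version_line_content = first_line.strip()
--     if ":" in version_line_content:
--         after_colon = version_line_content.split(":", 1)[1].strip()
--         if after_colon:
--             # Inline version like `version: "1.0.0"` or `version: 1.0.0`
--             # Return end of this line
--             return version_start + len(first_line)
--
--     # Dict-style version block - find where indentation returns to same or less level
--     pos = version_start + len(first_line)
--     for line in lines[1:]:
--         if not line.strip():
--             # Empty line - continue
--             pos += len(line) + 1
--             continue
--
--         line_indent = len(line) - len(line.lstrip())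
--         if line_indent <= version_indent:
--             # Back to same or lower indentation - block ended
--             break
--         pos += len(line) + 1
--
--     return pos
-- ===== SOURCE B (Python) =====
-- def _find_version_block_end(content: str, version_start: int) -> int:
--     tail = content[version_start:]
--     nl = tail.find("\n")
--     first = tail if nl == -1 else tail[:nl]
--     stripped = first.strip()
--     if ":" in stripped and stripped.split(":", 1)[1].strip():
--         # Inline `version: something` -- end of the first line.
--         return version_start + len(first)
--     version_indent = len(first) - len(first.lstrip())
--     if nl == -1:
--         return version_start + len(first)
--     # Dict-style: one character-level state machine over the raw text after the
--     # first newline -- no per-line splitting/stripping.  `cur` is the length of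
--     # the current line so far; while `seen` is False, `cur` is also the column
--     # of the next character, so the first non-whitespace character of a line
--     # arrives exactly at column == indent, where the block-end test fires.
--     end = version_start + len(first)
--     cur = 0
--     seen = False
--     for ch in tail[nl + 1:]:
--         if ch == "\n":
--             end += cur + 1
--             cur = 0
--             seen = False
--         elif not seen and not ch.isspace():
--             if cur <= version_indent:
--                 return end
--             seen = True
--             cur += 1
--         else:
--             cur += 1
--     return end + cur + 1
-- ===== Notes on version B (the rewrite author's own statement) =====
-- stated objective: alternative
-- what changed: The dict-style part no longer splits the text into lines and strips/measures each one; B runs a single character-level state machine (current-line length, seen-nonspace flag) over the raw text after the first newline, returning early at the first non-whitespace character that appears at column <= the base indent.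
import Mathlib
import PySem

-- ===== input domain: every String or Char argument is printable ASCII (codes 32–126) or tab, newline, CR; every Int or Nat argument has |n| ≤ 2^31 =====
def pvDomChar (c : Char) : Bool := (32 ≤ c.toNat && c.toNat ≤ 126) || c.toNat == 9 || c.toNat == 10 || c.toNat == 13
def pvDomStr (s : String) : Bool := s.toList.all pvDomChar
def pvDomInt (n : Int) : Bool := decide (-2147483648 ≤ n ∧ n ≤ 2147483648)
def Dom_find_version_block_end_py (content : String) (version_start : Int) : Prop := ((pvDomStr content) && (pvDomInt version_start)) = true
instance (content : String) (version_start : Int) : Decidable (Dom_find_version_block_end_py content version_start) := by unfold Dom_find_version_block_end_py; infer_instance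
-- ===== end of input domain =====

-- B replaces A's line-splitting scan (split("\n"), per-line strip/indent, position accumulator)
-- by a single character-level state machine over the raw text after the first newline
-- (objective: alternative decomposition, same cost).

-- shared helper (both sources compute len(x) - len(x.lstrip()))
def pvIndent (l : List Char) : Int := PySem.Chars.len l - PySem.Chars.len (PySem.Chars.lstrip l)

-- ===== PORT A =====
-- A's for-loop over lines[1:]: accumulator pos, 'continue' on blank lines, 'break' on dedent
def pvALoop (vindent : Int) : List (List Char) → Int → Int
  | [], pos => pos
  | l :: ls, pos =>
    if PySem.Chars.strip l = [] then pvALoop vindent ls (pos + PySem.Chars.len l + 1)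
    else if pvIndent l ≤ vindent then pos
    else pvALoop vindent ls (pos + PySem.Chars.len l + 1)

def find_version_block_end_py (content : String) (version_start : Int) : Int :=
  let lines := PySem.Chars.splitOn (PySem.List.slice content.toList (some version_start) none) ['\n']
  match lines with
  | [] => version_start   -- `if not lines:` (unreachable: split never yields [])
  | first :: rest =>
    let vindent := pvIndent first
    let vlc := PySem.Chars.strip first
    if PySem.Chars.isIn [':'] vlc then
      -- split(":", 1)[1]: index 1 exists because ':' occurs in vlc, so pyGetD is exact here
      let after := PySem.Chars.strip (PySem.List.pyGetD (PySem.Chars.splitOnMax vlc [':'] 1) 1 [])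
      if after ≠ [] then version_start + PySem.Chars.len first
      else pvALoop vindent rest (version_start + PySem.Chars.len first)
    else pvALoop vindent rest (version_start + PySem.Chars.len first)

-- ===== PORT B =====
-- Source B's for-loop over tail[nl+1:]: state (end, cur, seen), early return on a dedented non-space char
def pvBScan (vindent : Int) : List Char → Int → Int → Bool → Int
  | [], e, cur, _ => e + cur + 1
  | c :: cs, e, cur, seen =>
    if c = '\n' then pvBScan vindent cs (e + cur + 1) 0 false
    else if !seen && !(PySem.Chars.isspace c) then
      if cur ≤ vindent then e
      else pvBScan vindent cs e (cur + 1) true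
    else pvBScan vindent cs e (cur + 1) seen

def find_version_block_end_py_alt (content : String) (version_start : Int) : Int :=
  let tail := PySem.List.slice content.toList (some version_start) none
  let nl := PySem.Chars.find tail ['\n']
  let first := if nl = -1 then tail else PySem.Chars.slice tail none (some nl)
  let stripped := PySem.Chars.strip first
  if PySem.Chars.isIn [':'] stripped &&
      -- split(":", 1)[1]: index 1 exists because ':' occurs in stripped, so pyGetD is exact here
      !(PySem.Chars.strip (PySem.List.pyGetD (PySem.Chars.splitOnMax stripped [':'] 1) 1 [])).isEmpty then
    version_start + PySem.Chars.len first
  else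
    if nl = -1 then version_start + PySem.Chars.len first
    else pvBScan (pvIndent first) (PySem.Chars.slice tail (some (nl + 1)) none)
           (version_start + PySem.Chars.len first) 0 false

-- ===== PRECONDITION & SPEC =====
def Spec_find_version_block_end_py (content : String) (version_start : Int) (out : Int) : Prop := out = find_version_block_end_py_alt content version_start
instance (content : String) (version_start : Int) (out : Int) : Decidable (Spec_find_version_block_end_py content version_start out) := by unfold Spec_find_version_block_end_py; infer_instance

-- ===== CLAIM (what is proved, stated in full; the proofs are below) =====
def Claim_equal_find_version_block_end_py : Prop := ∀ (content : String) (version_start : Int), Dom_find_version_block_end_py content version_start → Spec_find_version_block_end_py content version_start (find_version_block_end_py content version_start)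

-- ===== LEMMAS AND PROOFS =====

-- structural form of split("\n"): the list of lines
def pvLines : List Char → List (List Char)
  | [] => [[]]
  | c :: r =>
    if c = '\n' then [] :: pvLines r
    else match pvLines r with
         | [] => [[c]]
         | l :: ls => (c :: l) :: ls

theorem pvLines_ne_nil (s : List Char) : pvLines s ≠ [] := by
  cases s with
  | nil => simp [pvLines]
  | cons c r =>
    simp only [pvLines]
    split_ifs
    · simp
    · cases h : pvLines r <;> simp

theorem pvGo_eq (fuel : Nat) : ∀ (l cur : List Char) (acc t : List (List Char)) (h : List Char),
    l.length ≤ fuel → pvLines l = h :: t →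
    PySem.Chars.splitOn.go ['\n'] fuel l cur acc = acc.reverse ++ (cur.reverse ++ h) :: t := by
  induction fuel with
  | zero =>
    intro l cur acc t h hlen hl
    interval_cases hl' : l.length
    · have : l = [] := List.length_eq_zero_iff.mp hl'
      subst this
      simp [pvLines] at hl
      simp [PySem.Chars.splitOn.go, hl.1, hl.2]
  | succ f ih =>
    intro l cur acc t h hlen hl
    cases l with
    | nil =>
      simp [pvLines] at hl
      simp [PySem.Chars.splitOn.go, hl.1, hl.2]
    | cons c rest =>
      by_cases hc : c = '\n'
      · subst hc
        have hl' : ([] : List Char) :: pvLines rest = h :: t := by simpa [pvLines] using hl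
        obtain ⟨h1, h2⟩ := List.cons_eq_cons.mp hl'
        cases ht : pvLines rest with
        | nil => exact absurd ht (pvLines_ne_nil rest)
        | cons h' t' =>
          have := ih rest [] (cur.reverse :: acc) t' h' (by simpa using Nat.le_of_succ_le_succ hlen) ht
          simp only [PySem.Chars.splitOn.go]
          rw [if_pos (by simp [List.isPrefixOf])]
          simp only [List.length_cons, List.length_nil, List.drop_succ_cons, List.drop_zero]
          rw [this, ← h1, ← h2, ht]
          simp
      · simp only [pvLines, if_neg hc] at hl
        cases ht : pvLines rest with
        | nil => exact absurd ht (pvLines_ne_nil rest)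
        | cons h' t' =>
          rw [ht] at hl
          obtain ⟨h1, h2⟩ := List.cons_eq_cons.mp hl
          have := ih rest (c :: cur) acc t' h' (by simpa using Nat.le_of_succ_le_succ hlen) ht
          simp only [PySem.Chars.splitOn.go]
          rw [if_neg (by simp [List.isPrefixOf]; exact fun hcc => hc hcc.symm)]
          rw [this, ← h1, ← h2]
          simp

theorem pvSplitOn_eq (s : List Char) : PySem.Chars.splitOn s ['\n'] = pvLines s := by
  cases ht : pvLines s with
  | nil => exact absurd ht (pvLines_ne_nil s)
  | cons h t =>
    unfold PySem.Chars.splitOn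
    rw [pvGo_eq (s.length + 1) s [] [] t h (by omega) ht]
    simp

theorem pvLines_no_nl (s : List Char) (h : '\n' ∉ s) : pvLines s = [s] := by
  induction s with
  | nil => rfl
  | cons c r ih =>
    simp only [List.mem_cons, not_or] at h
    simp [pvLines, Ne.symm h.1, ih h.2]

theorem pvLines_append_nl (a b : List Char) (h : '\n' ∉ a) :
    pvLines (a ++ '\n' :: b) = a :: pvLines b := by
  induction a with
  | nil => simp [pvLines]
  | cons c r ih =>
    simp only [List.mem_cons, not_or] at h
    simp only [List.cons_append, pvLines, if_neg (Ne.symm h.1 : ¬ c = '\n') ]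
    rw [ih h.2]

-- find(s, "\n") via go: index of the first newline, -1 if none
theorem pvFindGo_nl (s : List Char) : ∀ k : Nat,
    PySem.Chars.find.go ['\n'] s k =
      if '\n' ∈ s then ((k : Int) + ((s.takeWhile (fun c => c ≠ '\n')).length : Int)) else -1 := by
  induction s with
  | nil => intro k; simp [PySem.Chars.find.go]
  | cons c r ih =>
    intro k
    by_cases hc : c = '\n'
    · subst hc
      simp only [PySem.Chars.find.go]
      rw [if_pos (by simp [List.isPrefixOf])]
      simp [List.takeWhile]
    · simp only [PySem.Chars.find.go]
      rw [if_neg (by simp [List.isPrefixOf, Ne.symm hc])]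
      rw [ih (k + 1)]
      by_cases hm : '\n' ∈ r
      · rw [if_pos hm, if_pos (by simp [hm])]
        simp [List.takeWhile, hc]
        push_cast
        ring
      · rw [if_neg hm, if_neg (by simp [hm, hc]; exact fun h => absurd h.symm hc)]

theorem pvFind_nl (s : List Char) :
    PySem.Chars.find s ['\n'] =
      if '\n' ∈ s then (((s.takeWhile (fun c => c ≠ '\n')).length : Nat) : Int) else -1 := by
  unfold PySem.Chars.find
  rw [pvFindGo_nl s 0]
  split_ifs <;> simp

-- blank test: strip(l) == "" iff every char is whitespace
theorem pvStrip_nil_iff (l : List Char) :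
    (PySem.Chars.strip l = []) ↔ (∀ c ∈ l, PySem.Chars.isspace c = true) := by
  unfold PySem.Chars.strip PySem.Chars.rstrip PySem.Chars.lstrip
  constructor
  · intro h c hc
    have h1 : ∀ x ∈ (l.dropWhile PySem.Chars.isspace).reverse, PySem.Chars.isspace x = true := by
      apply List.dropWhile_eq_nil_iff.mp
      simpa using congrArg List.reverse h
    have h2 : ∀ x ∈ l.dropWhile PySem.Chars.isspace, PySem.Chars.isspace x = true := by
      intro x hx; exact h1 x (List.mem_reverse.mpr hx)
    rcases (List.mem_append.mp
        ((List.takeWhile_append_dropWhile (p := PySem.Chars.isspace) (l := l)) ▸ hc)) with hc1 | hc2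
    · exact List.mem_takeWhile_imp hc1
    · exact h2 c hc2
  · intro h
    have : l.dropWhile PySem.Chars.isspace = [] := List.dropWhile_eq_nil_iff.mpr h
    simp [this]

-- indent: len(l) - len(l.lstrip()) is the length of the whitespace prefix
theorem pvIndent_eq (l : List Char) :
    pvIndent l = ((l.takeWhile PySem.Chars.isspace).length : Int) := by
  unfold pvIndent PySem.Chars.lstrip
  simp only [PySem.Chars.len_eq]
  have := congrArg List.length (List.takeWhile_append_dropWhile (p := PySem.Chars.isspace) (l := l))
  simp only [List.length_append] at this
  omega

-- scanning a newline-free stretch with seen = true just advances cur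
theorem pvB_true (v : Int) (l : List Char) (h : '\n' ∉ l) : ∀ (r : List Char) (e cur : Int),
    pvBScan v (l ++ r) e cur true = pvBScan v r e (cur + l.length) true := by
  induction l with
  | nil => intro r e cur; simp
  | cons c cs ih =>
    intro r e cur
    simp only [List.mem_cons, not_or] at h
    simp only [List.cons_append, pvBScan, if_neg (Ne.symm h.1 : ¬ c = '\n')]
    simp only [Bool.not_true, Bool.false_and, Bool.false_eq_true, if_false]
    rw [ih h.2]
    congr 1
    push_cast [List.length_cons]
    ring

-- scanning a stretch of (non-newline) whitespace leaves seen unchanged and advances cur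
theorem pvB_ws (v : Int) (l : List Char)
    (h : ∀ c ∈ l, PySem.Chars.isspace c = true ∧ c ≠ '\n') : ∀ (r : List Char) (e cur : Int) (seen : Bool),
    pvBScan v (l ++ r) e cur seen = pvBScan v r e (cur + l.length) seen := by
  induction l with
  | nil => intro r e cur seen; simp
  | cons c cs ih =>
    intro r e cur seen
    have hc := h c (by simp)
    simp only [List.cons_append, pvBScan, if_neg hc.2]
    rw [if_neg (by simp [hc.1])]
    rw [ih (fun x hx => h x (by simp [hx]))]
    congr 1
    push_cast [List.length_cons]
    ring

-- one whole newline-free line starting from a fresh-line state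
theorem pvB_line (v : Int) (l : List Char) (hnl : '\n' ∉ l) (r : List Char) (e : Int) :
    pvBScan v (l ++ r) e 0 false =
      if ∀ c ∈ l, PySem.Chars.isspace c = true then pvBScan v r e (l.length) false
      else if ((l.takeWhile PySem.Chars.isspace).length : Int) ≤ v then e
      else pvBScan v r e (l.length) true := by
  have hsplit := List.takeWhile_append_dropWhile (p := PySem.Chars.isspace) (l := l)
  have hlw : ∀ x ∈ l.takeWhile PySem.Chars.isspace, PySem.Chars.isspace x = true ∧ x ≠ '\n' := by
    intro x hx
    refine ⟨List.mem_takeWhile_imp hx, fun hxe => hnl (hxe ▸ List.takeWhile_subset _ hx)⟩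
  by_cases hall : ∀ c ∈ l, PySem.Chars.isspace c = true
  · rw [if_pos hall]
    have hw : ∀ c ∈ l, PySem.Chars.isspace c = true ∧ c ≠ '\n' :=
      fun c hc => ⟨hall c hc, fun hce => hnl (hce ▸ hc)⟩
    rw [pvB_ws v l hw r e 0]
    ring_nf
  · rw [if_neg hall]
    cases hdw : l.dropWhile PySem.Chars.isspace with
    | nil => exact absurd (List.dropWhile_eq_nil_iff.mp hdw) hall
    | cons c t =>
      have hcns : PySem.Chars.isspace c = false := by
        have hne : l.dropWhile PySem.Chars.isspace ≠ [] := by simp [hdw]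
        have h0 := List.head_dropWhile_not (p := PySem.Chars.isspace) hne
        simp only [hdw, List.head_cons] at h0
        exact h0
      have hct : c ∈ l ∧ ∀ x ∈ t, x ∈ l := by
        constructor
        · have : c ∈ l.dropWhile PySem.Chars.isspace := by simp [hdw]
          exact List.dropWhile_subset _ this
        · intro x hx
          have : x ∈ l.dropWhile PySem.Chars.isspace := by simp [hdw, hx]
          exact List.dropWhile_subset _ this
      -- l = takeWhile ++ c :: t
      have hdecomp : l = l.takeWhile PySem.Chars.isspace ++ c :: t := by
        rw [← hdw, hsplit]
      have hlen : l.length = (l.takeWhile PySem.Chars.isspace).length + 1 + t.length := by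
        have := congrArg List.length hdecomp
        simp at this
        omega
      have hnt : '\n' ∉ t := fun hx => hnl (hct.2 _ hx)
      have key : pvBScan v (l ++ r) e 0 false
          = pvBScan v (c :: (t ++ r)) e (0 + ((l.takeWhile PySem.Chars.isspace).length : Int)) false := by
        conv_lhs => rw [hdecomp]
        rw [List.append_assoc, pvB_ws v _ hlw]
        rfl
      rw [key]
      simp only [zero_add, pvBScan,
        if_neg (show ¬ c = '\n' from fun hcc => hnl (hcc ▸ hct.1))]
      rw [if_pos (by simp [hcns])]
      by_cases hle : ((l.takeWhile PySem.Chars.isspace).length : Int) ≤ v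
      · rw [if_pos hle, if_pos hle]
      · rw [if_neg hle, if_neg hle, pvB_true v t hnt r]
        congr 1
        omega

-- the state machine over the raw text computes A's per-line loop over its lines
theorem pvM (v : Int) : ∀ (n : Nat) (s : List Char), s.length ≤ n → ∀ e : Int,
    pvBScan v s e 0 false = pvALoop v (pvLines s) e := by
  intro n
  induction n with
  | zero =>
    intro s hlen e
    have : s = [] := List.length_eq_zero_iff.mp (Nat.le_zero.mp hlen)
    subst this
    simp [pvBScan, pvLines, pvALoop, pvStrip_nil_iff, PySem.Chars.len_eq]
  | succ m ih =>
    intro s hlen e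
    by_cases hmem : '\n' ∈ s
    · -- s = a ++ '\n' :: b
      set a := s.takeWhile (fun c => c ≠ '\n') with ha
      have hna : '\n' ∉ a := by
        intro hx
        have := List.mem_takeWhile_imp hx
        simp at this
      obtain ⟨b, hs⟩ : ∃ b, s = a ++ '\n' :: b := by
        cases hdw : s.dropWhile (fun c => c ≠ '\n') with
        | nil =>
          exfalso
          have hall := List.dropWhile_eq_nil_iff.mp hdw
          have := hall '\n' hmem
          simp at this
        | cons c t =>
          refine ⟨t, ?_⟩
          have hc : c = '\n' := by
            have hne : s.dropWhile (fun c => c ≠ '\n') ≠ [] := by rw [hdw]; simp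
            have h0 := List.head_dropWhile_not (p := fun c => c ≠ '\n') hne
            simp only [hdw, List.head_cons] at h0
            simpa using h0
          rw [← List.takeWhile_append_dropWhile (p := fun c => c ≠ '\n') (l := s), hdw, hc, ha]
      have hblen : b.length ≤ m := by
        have := congrArg List.length hs
        simp at this
        omega
      rw [hs, pvLines_append_nl a b hna, pvB_line v a hna]
      simp only [pvALoop, pvStrip_nil_iff, pvIndent_eq, PySem.Chars.len_eq]
      by_cases hall : ∀ c ∈ a, PySem.Chars.isspace c = true
      · rw [if_pos hall, if_pos hall]
        simp only [pvBScan, if_pos rfl]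
        rw [ih b hblen]
        simp
      · rw [if_neg hall, if_neg hall]
        by_cases hle : ((a.takeWhile PySem.Chars.isspace).length : Int) ≤ v
        · rw [if_pos hle, if_pos hle]
        · rw [if_neg hle, if_neg hle]
          simp only [pvBScan, if_pos rfl]
          rw [ih b hblen]
          simp
    · rw [pvLines_no_nl s hmem, show s = s ++ [] by simp, pvB_line v s hmem]
      simp only [List.append_nil] at *
      simp only [pvALoop, pvStrip_nil_iff, pvIndent_eq, PySem.Chars.len_eq]
      by_cases hall : ∀ c ∈ s, PySem.Chars.isspace c = true
      · rw [if_pos hall, if_pos hall]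
        simp [pvBScan, pvALoop]
      · rw [if_neg hall, if_neg hall]
        by_cases hle : ((s.takeWhile PySem.Chars.isspace).length : Int) ≤ v
        · rw [if_pos hle, if_pos hle]
        · rw [if_neg hle, if_neg hle]
          simp [pvBScan, pvALoop]

-- takeWhile up to the first newline
theorem pvTW (a b : List Char) (h : '\n' ∉ a) :
    (a ++ '\n' :: b).takeWhile (fun c => c ≠ '\n') = a := by
  induction a with
  | nil => simp
  | cons c r ih =>
    simp only [List.mem_cons, not_or] at h
    simp only [List.cons_append, List.takeWhile_cons]
    rw [if_pos (by simp; exact fun hcc => h.1 hcc.symm)]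
    rw [ih h.2]

theorem find_version_block_end_py_spec : Claim_equal_find_version_block_end_py := by
  intro content version_start _
  unfold Spec_find_version_block_end_py
  simp only [find_version_block_end_py, find_version_block_end_py_alt]
  generalize PySem.List.slice content.toList (some version_start) none = tail
  rw [pvSplitOn_eq, pvFind_nl]
  by_cases hmem : '\n' ∈ tail
  · simp only [hmem, if_true]
    obtain ⟨a, b, hna, hs⟩ : ∃ a b, '\n' ∉ a ∧ tail = a ++ '\n' :: b := by
      refine ⟨tail.takeWhile (fun c => c ≠ '\n'), ?_⟩
      have hna : '\n' ∉ tail.takeWhile (fun c => c ≠ '\n') := by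
        intro hx
        have := List.mem_takeWhile_imp hx
        simp at this
      cases hdw : tail.dropWhile (fun c => c ≠ '\n') with
      | nil =>
        exfalso
        have hall := List.dropWhile_eq_nil_iff.mp hdw
        have := hall '\n' hmem
        simp at this
      | cons c t =>
        refine ⟨t, hna, ?_⟩
        have hc : c = '\n' := by
          have hne : tail.dropWhile (fun c => c ≠ '\n') ≠ [] := by rw [hdw]; simp
          have h0 := List.head_dropWhile_not (p := fun c => c ≠ '\n') hne
          simp only [hdw, List.head_cons] at h0
          simpa using h0
        conv_lhs => rw [← List.takeWhile_append_dropWhile (p := fun c => c ≠ '\n') (l := tail), hdw, hc]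
    subst hs
    rw [pvTW a b hna]
    have hne : ¬ ((a.length : Int) = -1) := by omega
    simp only [hne, if_false]
    have hfirst : PySem.Chars.slice (a ++ '\n' :: b) none (some (a.length : Int)) = a := by
      rw [PySem.Chars.slice_eq_listSlice, PySem.List.slice_to _ (by omega)]
      simp [List.take_left']
    have hrest : PySem.Chars.slice (a ++ '\n' :: b) (some ((a.length : Int) + 1)) none = b := by
      rw [PySem.Chars.slice_eq_listSlice, PySem.List.slice_from _ (by omega)]
      have : ((a.length : Int) + 1).toNat = a.length + 1 := by omega
      rw [this]
      simp [List.drop_append]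
    rw [hfirst, hrest, pvLines_append_nl a b hna]
    dsimp only
    by_cases hcolon : PySem.Chars.isIn [':'] (PySem.Chars.strip a) = true
    · by_cases hafter :
        PySem.Chars.strip (PySem.List.pyGetD (PySem.Chars.splitOnMax (PySem.Chars.strip a) [':'] 1) 1 []) = []
      · rw [if_pos hcolon, if_neg (by simp [hafter]), if_neg (by simp [hafter])]
        rw [pvM (pvIndent a) b.length b le_rfl]
      · rw [if_pos hcolon, if_pos (by simp [hafter]), if_pos (by simp [hcolon, hafter])]
    · rw [if_neg hcolon, if_neg (by simp [hcolon])]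
      rw [pvM (pvIndent a) b.length b le_rfl]
  · simp only [hmem, if_false]
    rw [pvLines_no_nl tail hmem]
    dsimp only
    simp only [if_true]
    by_cases hcolon : PySem.Chars.isIn [':'] (PySem.Chars.strip tail) = true
    · by_cases hafter :
        PySem.Chars.strip (PySem.List.pyGetD (PySem.Chars.splitOnMax (PySem.Chars.strip tail) [':'] 1) 1 []) = []
      · rw [if_pos hcolon, if_neg (by simp [hafter]), if_neg (by simp [hafter])]
        simp [pvALoop]
      · rw [if_pos hcolon, if_pos (by simp [hafter]), if_pos (by simp [hcolon, hafter])]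
    · rw [if_neg hcolon, if_neg (by simp [hcolon])]
      simp [pvALoop]
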